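-- pv_equiv track=rewrite | github.com/AndresAp01/Taller_de_Programacion | sem9_intro.py | Operar_For_Range
-- ===== SOURCE A (Python) =====
-- def Operar_For_Range(lista):
--     if type(lista)!=list or len(lista)==0:
--         return"Error"
--     resultado=[0]*len(lista)
--     for i in range(len(lista)):
--         indice_0=i%len(lista)
--         indice_2=(i+2)%len(lista)
--         indice_4=(i+4)%len(lista)
--
--         resultado[i]=lista[indice_0]+lista[indice_2]-lista[indice_4]
--     return resultado
-- ===== SOURCE B (Python) =====
-- def Operar_For_Range(lista):
--     if type(lista) != list or len(lista) == 0: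
--         return "Error"
--     n = len(lista)
--     r2, r4 = 2 % n, 4 % n
--     rot2 = lista[r2:] + lista[:r2]
--     rot4 = lista[r4:] + lista[:r4]
--     return [a + b - c for a, b, c in zip(lista, rot2, rot4)]
-- ===== Notes on version B (the rewrite author's own statement) =====
-- stated objective: idiomatic
-- what changed: Replaces the per-element modular index arithmetic writing into a preallocated result with two rotated views built once by slicing (offsets reduced mod n) combined in a single zip comprehension.
-- outside the precondition, e.g. on Operar_For_Range([]): A returns 'Error', B returns 'Error'
import Mathlib
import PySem

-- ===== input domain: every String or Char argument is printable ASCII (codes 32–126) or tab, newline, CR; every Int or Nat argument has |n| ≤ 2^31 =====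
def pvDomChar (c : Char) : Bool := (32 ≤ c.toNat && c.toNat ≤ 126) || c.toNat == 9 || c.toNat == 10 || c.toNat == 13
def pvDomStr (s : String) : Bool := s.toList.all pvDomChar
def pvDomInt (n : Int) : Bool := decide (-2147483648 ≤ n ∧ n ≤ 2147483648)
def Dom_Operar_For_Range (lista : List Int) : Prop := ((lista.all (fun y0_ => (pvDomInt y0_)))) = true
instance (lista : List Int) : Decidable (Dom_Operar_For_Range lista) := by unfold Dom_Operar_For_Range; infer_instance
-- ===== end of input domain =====

-- B replaces A's per-element modular index arithmetic (writing into a preallocated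
-- result list) with two rotated views built once by slicing, combined elementwise.

-- ===== PORT A =====
-- The Python returns the string "Error" for an empty list (not a value of the
-- declared List Int return type); Pre_ excludes that input.
def Operar_For_Range (lista : List Int) : List Int :=
  (PySem.List.pyRange 0 lista.length 1).foldl
    (fun resultado i =>
      PySem.List.pySetD resultado i
        (PySem.List.pyGetD lista (PySem.Int.mod i lista.length) 0
         + PySem.List.pyGetD lista (PySem.Int.mod (i + 2) lista.length) 0
         - PySem.List.pyGetD lista (PySem.Int.mod (i + 4) lista.length) 0))
    (List.replicate lista.length 0)

-- ===== PORT B =====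
def Operar_For_Range_alt (lista : List Int) : List Int :=
  let n : Int := lista.length
  let r2 := PySem.Int.mod 2 n
  let r4 := PySem.Int.mod 4 n
  let rot2 := PySem.List.slice lista (some r2) none ++ PySem.List.slice lista none (some r2)
  let rot4 := PySem.List.slice lista (some r4) none ++ PySem.List.slice lista none (some r4)
  (lista.zip (rot2.zip rot4)).map (fun t => t.1 + t.2.1 - t.2.2)

-- ===== PRECONDITION & SPEC =====
-- Pre_ excludes the empty list, on which A returns the string "Error" (not a List Int).
def Pre_Operar_For_Range (lista : List Int) : Prop := lista ≠ []
instance (lista : List Int) : Decidable (Pre_Operar_For_Range lista) := by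
  unfold Pre_Operar_For_Range; infer_instance
def pvWitness_Operar_For_Range : List Int := [1, 2, 3]
def Spec_Operar_For_Range (lista : List Int) (out : List Int) : Prop := out = Operar_For_Range_alt lista
instance (lista : List Int) (out : List Int) : Decidable (Spec_Operar_For_Range lista out) := by
  unfold Spec_Operar_For_Range; infer_instance

-- ===== CLAIM (what is proved, stated in full; the proofs are below) =====
def Claim_equal_Operar_For_Range : Prop := ∀ (lista : List Int), Dom_Operar_For_Range lista → Pre_Operar_For_Range lista → Spec_Operar_For_Range lista (Operar_For_Range lista)

-- ===== LEMMAS AND PROOFS =====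

-- the common characterisation: element j of the result
def pvF (l : List Int) (j : Nat) : Int :=
  l.getD (j % l.length) 0 + l.getD ((j + 2) % l.length) 0 - l.getD ((j + 4) % l.length) 0

-- A's loop fills slot k of the preallocated list with G k
theorem pvFill (G : Nat → Int) (n : Nat) :
    ∀ m, m ≤ n →
    (List.range m).foldl (fun r k => PySem.List.pySetD r ((k : Nat) : Int) (G k)) (List.replicate n 0)
      = (List.range n).map (fun j => if j < m then G j else 0) := by
  intro m
  induction m with
  | zero =>
    intro _
    apply List.ext_getElem <;> simp
  | succ m ih =>
    intro hm
    rw [List.range_succ, List.foldl_append, ih (by omega)]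
    simp only [List.foldl_cons, List.foldl_nil, PySem.List.pySetD_natCast]
    apply List.ext_getElem
    · simp
    · intro i h1 h2
      simp only [List.getElem_set, List.getElem_map, List.getElem_range]
      simp only [List.length_set, List.length_map, List.length_range] at h1
      by_cases hmi : m = i
      · subst hmi; simp
      · simp only [hmi, if_false]
        split_ifs <;> first | rfl | omega

theorem pvA_eq (l : List Int) (hl : l ≠ []) :
    Operar_For_Range l = (List.range l.length).map (pvF l) := by
  have hn : 0 < l.length := List.length_pos_iff.mpr hl
  unfold Operar_For_Range
  rw [PySem.List.pyRange_one]
  simp only [sub_zero, Int.toNat_natCast, zero_add]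
  rw [List.foldl_map]
  have hfun : (fun (r : List Int) (k : Nat) =>
      PySem.List.pySetD r ((k : Nat) : Int)
        (PySem.List.pyGetD l (PySem.Int.mod (k : Int) l.length) 0
         + PySem.List.pyGetD l (PySem.Int.mod ((k : Int) + 2) l.length) 0
         - PySem.List.pyGetD l (PySem.Int.mod ((k : Int) + 4) l.length) 0))
      = fun r k => PySem.List.pySetD r ((k : Nat) : Int) (pvF l k) := by
    funext r k
    congr 1
    have h2 : ((k : Int) + 2) = (((k + 2 : Nat)) : Int) := by push_cast; ring
    have h4 : ((k : Int) + 4) = (((k + 4 : Nat)) : Int) := by push_cast; ring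
    rw [h2, h4]
    rw [PySem.Int.mod_natCast, PySem.Int.mod_natCast, PySem.Int.mod_natCast]
    rw [PySem.List.pyGetD_natCast, PySem.List.pyGetD_natCast, PySem.List.pyGetD_natCast]
    simp only [pvF]
  rw [hfun, pvFill (pvF l) l.length l.length le_rfl]
  apply List.map_congr_left
  intro j hj
  simp only [List.mem_range] at hj
  simp [hj]

-- element i of a rotation by a < length
theorem pvRot (l : List Int) (a i : Nat) (ha : a < l.length) (hi : i < l.length)
    (h : i < (l.drop a ++ l.take a).length) :
    (l.drop a ++ l.take a)[i]'h = l.getD ((i + a) % l.length) 0 := by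
  have hlen : (l.drop a).length = l.length - a := by simp
  by_cases hcase : i < l.length - a
  · rw [List.getElem_append_left (by omega)]
    rw [List.getElem_drop]
    rw [Nat.mod_eq_of_lt (by omega)]
    rw [List.getD_eq_getElem _ _ (by omega)]
    congr 1
    omega
  · rw [List.getElem_append_right (by omega)]
    rw [List.getElem_take]
    have hmod : (i + a) % l.length = i - (l.length - a) := by
      rw [Nat.mod_eq_sub_mod (by omega), Nat.mod_eq_of_lt (by omega)]
      omega
    rw [hmod, List.getD_eq_getElem _ _ (by omega)]
    simp only [List.length_drop]

theorem pvB_eq (l : List Int) (hl : l ≠ []) :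
    Operar_For_Range_alt l = (List.range l.length).map (pvF l) := by
  have hn : 0 < l.length := List.length_pos_iff.mpr hl
  have h2 : PySem.Int.mod 2 (l.length : Int) = (((2 % l.length : Nat)) : Int) := by
    exact_mod_cast PySem.Int.mod_natCast 2 l.length
  have h4 : PySem.Int.mod 4 (l.length : Int) = (((4 % l.length : Nat)) : Int) := by
    exact_mod_cast PySem.Int.mod_natCast 4 l.length
  unfold Operar_For_Range_alt
  simp only [h2, h4, PySem.List.slice_from_natCast, PySem.List.slice_to_natCast]
  have ha2 : 2 % l.length < l.length := Nat.mod_lt _ hn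
  have ha4 : 4 % l.length < l.length := Nat.mod_lt _ hn
  apply List.ext_getElem
  · simp; omega
  · intro i h1 hmapl
    have hi : i < l.length := by
      simp at hmapl; omega
    simp only [List.getElem_map, List.getElem_zip, List.getElem_range]
    have r2 := pvRot l (2 % l.length) i ha2 hi (by simp; omega)
    have r4 := pvRot l (4 % l.length) i ha4 hi (by simp; omega)
    rw [r2, r4]
    simp only [pvF, Nat.add_mod_mod, Nat.mod_eq_of_lt hi]
    rw [List.getD_eq_getElem _ _ hi]

-- ===== VERDICT (by name: the statement is the Claim_ definition above) =====
theorem Operar_For_Range_spec : Claim_equal_Operar_For_Range := by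
  intro lista _ hpre
  unfold Spec_Operar_For_Range
  rw [pvA_eq lista hpre, pvB_eq lista hpre]
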